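-- pv_equiv track=rewrite | github.com/namedai01/CodeATTT | Algorithm.py | so_hoa_ten
-- ===== SOURCE A (Python) =====
-- def so_hoa_ten(name, base=26):
--     name = name.lower()
--     len_name = len(name)
--     i = 1
--     ord_a = ord('a')
--     ans = 0
--     for char in name:
--         new_char_code = ord(char)-ord_a
--         offset = len_name - i
--         ans += new_char_code*base**offset
--         i += 1
--     return ans
-- ===== SOURCE B (Python) =====
-- def so_hoa_ten(name, base=26):
--     ans = 0
--     for char in name.lower():
--         ans = ans * base + (ord(char) - ord('a'))
--     return ans
-- ===== Notes on version B (the rewrite author's own statement) =====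
-- stated objective: faster
-- what changed: Replaced the per-character positional sum with explicit exponentiation base**(len-i) by Horner's method (ans = ans*base + code), removing the power computation entirely.
import Mathlib
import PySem

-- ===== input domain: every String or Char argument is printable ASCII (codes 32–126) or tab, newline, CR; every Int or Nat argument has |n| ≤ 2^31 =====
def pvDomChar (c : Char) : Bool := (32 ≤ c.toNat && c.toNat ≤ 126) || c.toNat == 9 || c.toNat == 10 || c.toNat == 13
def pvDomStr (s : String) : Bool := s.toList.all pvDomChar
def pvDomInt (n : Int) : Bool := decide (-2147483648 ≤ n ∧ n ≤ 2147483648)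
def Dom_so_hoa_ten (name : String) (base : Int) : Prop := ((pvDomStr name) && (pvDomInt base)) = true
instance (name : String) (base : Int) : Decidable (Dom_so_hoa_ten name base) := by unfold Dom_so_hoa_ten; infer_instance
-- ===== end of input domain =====

-- B replaces A's per-character power base**(len-i) with Horner's method (ans = ans*base + code): faster, same value.

-- ===== PORT A =====
-- A's loop state: (ans, i); each step adds (ord char - ord 'a') * base ** (len_name - i).
def soHoaTenStepA (len : Nat) (base : Int) (st : Int × Nat) (c : Char) : Int × Nat :=
  (st.1 + ((c.toNat : Int) - 97) * base ^ (len - st.2), st.2 + 1)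

def so_hoa_ten (name : String) (base : Int) : Int :=
  let nm := (PySem.Str.lower name).toList
  let len := nm.length
  (nm.foldl (soHoaTenStepA len base) (0, 1)).1

-- ===== PORT B =====
def so_hoa_ten_alt (name : String) (base : Int) : Int :=
  (PySem.Str.lower name).toList.foldl (fun ans c => ans * base + ((c.toNat : Int) - 97)) 0

-- ===== PRECONDITION & SPEC =====
def Spec_so_hoa_ten (name : String) (base : Int) (out : Int) : Prop := out = so_hoa_ten_alt name base
instance (name : String) (base : Int) (out : Int) : Decidable (Spec_so_hoa_ten name base out) := by unfold Spec_so_hoa_ten; infer_instance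

-- ===== CLAIM (what is proved, stated in full; the proofs are below) =====
def Claim_equal_so_hoa_ten : Prop := ∀ (name : String) (base : Int), Dom_so_hoa_ten name base → Spec_so_hoa_ten name base (so_hoa_ten name base)

-- ===== LEMMAS AND PROOFS =====

-- Horner's fold shifts its accumulator by base^|l|.
theorem horner_shift (base : Int) (l : List Char) (a : Int) :
    l.foldl (fun ans c => ans * base + ((c.toNat : Int) - 97)) a
      = a * base ^ l.length + l.foldl (fun ans c => ans * base + ((c.toNat : Int) - 97)) 0 := by
  induction l generalizing a with
  | nil => simp
  | cons c l ih =>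
    simp only [List.foldl_cons, List.length_cons]
    rw [ih (a * base + _), ih (0 * base + _)]
    ring

-- A's fold over a suffix, with the counter aligned (i + |l| = len + 1), equals ans + Horner of the suffix.
theorem stepA_eq_horner (base : Int) (len : Nat) (l : List Char) (ans : Int) (i : Nat)
    (h : i + l.length = len + 1) :
    (l.foldl (soHoaTenStepA len base) (ans, i)).1
      = ans + l.foldl (fun ans c => ans * base + ((c.toNat : Int) - 97)) 0 := by
  induction l generalizing ans i with
  | nil => simp
  | cons c l ih =>
    have h' : (i + 1) + l.length = len + 1 := by simp only [List.length_cons] at h; omega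
    have hlen : len - i = l.length := by simp only [List.length_cons] at h; omega
    have hR := horner_shift base l (0 * base + ((c.toNat : Int) - 97))
    simp only [List.foldl_cons, soHoaTenStepA]
    rw [ih _ (i + 1) h', hR, hlen]
    ring

-- ===== VERDICT (by name: the statement is the Claim_ definition above) =====
theorem so_hoa_ten_spec : Claim_equal_so_hoa_ten := by
  intro name base _
  unfold Spec_so_hoa_ten so_hoa_ten so_hoa_ten_alt
  rw [stepA_eq_horner base _ _ 0 1 (by omega)]
  ring
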